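-- pv_equiv track=rewrite | github.com/fangguanya/cocoindex | cpp_treesitter/analyzer/type_inference.py | _extract_all_template_args
-- ===== SOURCE A (Python) =====
-- from typing import Dict, List, Optional, Set, Tuple, Any
--
-- def _extract_all_template_args(template_type: str) -> List[str]:
--     """提取所有模板参数"""
--     if '<' not in template_type or '>' not in template_type:
--         return []
--
--     start = template_type.find('<')
--     end = template_type.rfind('>')
--     if start == -1 or end == -1 or start >= end:
--         return []
--
--     args_str = template_type[start+1:end].strip()
--     if not args_str:
--         return []
--
--     # 简单分割（需要处理嵌套模板的情况）
--     args = []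
--     current_arg = ""
--     depth = 0
--
--     for char in args_str:
--         if char == '<':
--             depth += 1
--             current_arg += char
--         elif char == '>':
--             depth -= 1
--             current_arg += char
--         elif char == ',' and depth == 0:
--             args.append(current_arg.strip())
--             current_arg = ""
--         else:
--             current_arg += char
--
--     if current_arg.strip():
--         args.append(current_arg.strip())
--
--     return args
-- ===== SOURCE B (Python) =====
-- from typing import List
--
-- def _extract_all_template_args(template_type: str) -> List[str]:
--     start = template_type.find('<')
--     end = template_type.rfind('>')
--     if start == -1 or end == -1 or start >= end:
--         return []
--
--     args_str = template_type[start + 1:end].strip()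
--     if not args_str:
--         return []
--
--     # one pass recording indices of top-level commas, then slice between them
--     depth = 0
--     bounds = []
--     for i, ch in enumerate(args_str):
--         if ch == '<':
--             depth += 1
--         elif ch == '>':
--             depth -= 1
--         elif ch == ',' and depth == 0:
--             bounds.append(i)
--
--     args = []
--     prev = 0
--     for b in bounds:
--         args.append(args_str[prev:b].strip())
--         prev = b + 1
--     last = args_str[prev:].strip()
--     if last:
--         args.append(last)
--     return args
-- ===== Notes on version B (the rewrite author's own statement) =====
-- stated objective: alternative
-- what changed: Replaces the character-accumulator loop (building each argument char by char in a mutable current_arg) with an index pass that only records positions of top-level commas, then reconstructs the arguments by slicing args_str between successive boundaries.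
import Mathlib
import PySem

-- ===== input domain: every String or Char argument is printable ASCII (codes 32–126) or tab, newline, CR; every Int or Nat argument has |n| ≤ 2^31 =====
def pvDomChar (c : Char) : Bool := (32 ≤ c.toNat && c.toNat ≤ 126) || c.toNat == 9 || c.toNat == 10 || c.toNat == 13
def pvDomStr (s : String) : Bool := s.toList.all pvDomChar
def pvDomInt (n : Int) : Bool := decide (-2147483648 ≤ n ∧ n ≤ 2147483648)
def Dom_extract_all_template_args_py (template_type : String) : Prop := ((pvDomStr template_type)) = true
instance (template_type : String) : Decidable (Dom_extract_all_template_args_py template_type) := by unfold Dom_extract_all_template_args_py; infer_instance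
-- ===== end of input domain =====

-- B replaces A's character-accumulator loop with a pass recording top-level comma indices
-- followed by slicing; same return value, no speed claim.

-- ===== PORT A =====
-- the for-loop over args_str with state (args, current_arg, depth); arguments kept as List Char
def pvALoop : List Char → List (List Char) → List Char → Int → List (List Char)
  | [], args, cur, _ =>
      if PySem.Chars.strip cur ≠ [] then args ++ [PySem.Chars.strip cur] else args
  | c :: t, args, cur, d =>
      if c = '<' then pvALoop t args (cur ++ [c]) (d + 1)
      else if c = '>' then pvALoop t args (cur ++ [c]) (d - 1)
      else if c = ',' ∧ d = 0 then pvALoop t (args ++ [PySem.Chars.strip cur]) [] d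
      else pvALoop t args (cur ++ [c]) d

def extract_all_template_args_py (template_type : String) : List String :=
  let s := template_type.toList
  if ¬ (PySem.Chars.isIn ['<'] s) ∨ ¬ (PySem.Chars.isIn ['>'] s) then []
  else
    let start := PySem.Chars.find s ['<']
    let stop := PySem.Chars.rfind s ['>']
    if start = -1 ∨ stop = -1 ∨ start ≥ stop then []
    else
      let args_str := PySem.Chars.strip (PySem.List.slice s (some (start + 1)) (some stop))
      if args_str = [] then []
      else (pvALoop args_str [] [] 0).map String.ofList

-- ===== PORT B =====
-- first pass: indices of commas at bracket depth 0
def pvBBounds : List Char → Nat → Int → List Nat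
  | [], _, _ => []
  | c :: t, i, d =>
      if c = '<' then pvBBounds t (i + 1) (d + 1)
      else if c = '>' then pvBBounds t (i + 1) (d - 1)
      else if c = ',' ∧ d = 0 then i :: pvBBounds t (i + 1) d
      else pvBBounds t (i + 1) d

-- second pass: slice args_str between successive boundaries
def pvBAssemble (s : List Char) : List Nat → List (List Char) → Nat → List (List Char)
  | [], args, prev =>
      let last := PySem.Chars.strip (PySem.List.slice s (some (prev : Int)) none)
      if last ≠ [] then args ++ [last] else args
  | b :: bs, args, prev =>
      pvBAssemble s bs
        (args ++ [PySem.Chars.strip (PySem.List.slice s (some (prev : Int)) (some (b : Int)))])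
        (b + 1)

def extract_all_template_args_py_alt (template_type : String) : List String :=
  let s := template_type.toList
  let start := PySem.Chars.find s ['<']
  let stop := PySem.Chars.rfind s ['>']
  if start = -1 ∨ stop = -1 ∨ start ≥ stop then []
  else
    let args_str := PySem.Chars.strip (PySem.List.slice s (some (start + 1)) (some stop))
    if args_str = [] then []
    else (pvBAssemble args_str (pvBBounds args_str 0 0) [] 0).map String.ofList

-- ===== PRECONDITION & SPEC =====
def Spec_extract_all_template_args_py (template_type : String) (out : List String) : Prop := out = extract_all_template_args_py_alt template_type
instance (template_type : String) (out : List String) : Decidable (Spec_extract_all_template_args_py template_type out) := by unfold Spec_extract_all_template_args_py; infer_instance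

-- ===== CLAIM (what is proved, stated in full; the proofs are below) =====
def Claim_equal_extract_all_template_args_py : Prop := ∀ (template_type : String), Dom_extract_all_template_args_py template_type → Spec_extract_all_template_args_py template_type (extract_all_template_args_py template_type)

-- ===== LEMMAS AND PROOFS =====

-- rfind.go returns -1 when sub is a prefix at no position
lemma pv_rfind_go_neg (s sub : List Char) (h : ∀ j, ¬ sub <+: s.drop j) :
    ∀ n, PySem.Chars.rfind.go s sub n = -1 := by
  intro n
  induction n with
  | zero =>
      simp only [PySem.Chars.rfind.go]
      have := h 0
      simp only [List.drop_zero] at this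
      simp [List.isPrefixOf_iff_prefix, this]
  | succ j ih =>
      simp only [PySem.Chars.rfind.go] at ih ⊢
      have := h (j + 1)
      simp [List.isPrefixOf_iff_prefix, this, ih]

lemma pv_rfind_eq_neg_one (s sub : List Char) (h : ¬ sub <:+: s) :
    PySem.Chars.rfind s sub = -1 := by
  have h' : ∀ j, ¬ sub <+: s.drop j := by
    intro j hp
    have hin := (PySem.Chars.exists_prefix_drop_iff_isIn ..).mp ⟨j, hp⟩
    exact h ((PySem.Chars.isIn_iff_infix ..).mp hin)
  exact pv_rfind_go_neg s sub h' _

-- the accumulator A carries is the slice s[prev:pos]; one more char extends it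
lemma pv_take_succ_of_drop (s : List Char) (prev pos : Nat) (c : Char) (t : List Char)
    (hd : s.drop pos = c :: t) (hle : prev ≤ pos) :
    (s.drop prev).take (pos + 1 - prev) = (s.drop prev).take (pos - prev) ++ [c] := by
  have hsp : s[pos]? = some c := by
    have h0 : (s.drop pos)[0]? = s[pos + 0]? := List.getElem?_drop
    rw [hd] at h0
    simpa using h0.symm
  have hget : (s.drop prev)[pos - prev]? = some c := by
    rw [List.getElem?_drop]
    have hpp : prev + (pos - prev) = pos := by omega
    rw [hpp, hsp]
  have h1 : pos + 1 - prev = (pos - prev) + 1 := by omega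
  rw [h1, List.take_add_one, hget]
  rfl

set_option maxRecDepth 4000 in
-- main invariant: A's loop on the suffix s.drop pos, with accumulator s[prev:pos],
-- equals B's assembly of the boundaries found from position pos
lemma pv_main (s : List Char) :
    ∀ (t : List Char) (pos prev : Nat) (d : Int) (args : List (List Char)),
      t = s.drop pos → prev ≤ pos →
      pvALoop t args ((s.drop prev).take (pos - prev)) d
        = pvBAssemble s (pvBBounds t pos d) args prev := by
  intro t
  induction t with
  | nil =>
      intro pos prev d args ht hle
      have hlen : s.length ≤ pos := by
        by_contra hnot
        have hne : s.drop pos ≠ [] := by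
          simp [List.drop_eq_nil_iff]; omega
        exact hne ht.symm
      have htake : (s.drop prev).take (pos - prev) = s.drop prev := by
        apply List.take_of_length_le
        simp; omega
      simp only [pvALoop, pvBBounds, pvBAssemble, htake,
        PySem.List.slice_from_natCast]
  | cons c t ih =>
      intro pos prev d args ht hle
      have hd : s.drop pos = c :: t := ht.symm
      have ht' : t = s.drop (pos + 1) := by
        have h0 := congrArg List.tail hd
        rw [List.tail_drop] at h0
        simpa using h0.symm
      have hstep := pv_take_succ_of_drop s prev pos c t hd hle
      rw [pvALoop, pvBBounds]
      by_cases h1 : c = '<'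
      · rw [if_pos h1, if_pos h1, ← hstep]
        exact ih (pos + 1) prev (d + 1) args ht' (by omega)
      · rw [if_neg h1, if_neg h1]
        by_cases h2 : c = '>'
        · rw [if_pos h2, if_pos h2, ← hstep]
          exact ih (pos + 1) prev (d - 1) args ht' (by omega)
        · rw [if_neg h2, if_neg h2]
          by_cases h3 : c = ',' ∧ d = 0
          · rw [if_pos h3, if_pos h3, pvBAssemble]
            have hsl : PySem.List.slice s (some (prev : Int)) (some (pos : Int))
                = (s.drop prev).take (pos - prev) := PySem.List.slice_natCast s prev pos
            rw [hsl]
            have := ih (pos + 1) (pos + 1) d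
              (args ++ [PySem.Chars.strip ((s.drop prev).take (pos - prev))]) ht' (by omega)
            simpa using this
          · rw [if_neg h3, if_neg h3, ← hstep]
            exact ih (pos + 1) prev d args ht' (by omega)

-- ===== VERDICT (by name: the statement is the Claim_ definition above) =====
theorem extract_all_template_args_py_spec : Claim_equal_extract_all_template_args_py := by
  intro template_type _
  unfold Spec_extract_all_template_args_py
  unfold extract_all_template_args_py extract_all_template_args_py_alt
  set s := template_type.toList with hs
  by_cases hin : ¬ (PySem.Chars.isIn ['<'] s) ∨ ¬ (PySem.Chars.isIn ['>'] s)
  · rw [if_pos hin]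
    rcases hin with h | h
    · have hf : PySem.Chars.find s ['<'] = -1 := by
        rw [PySem.Chars.find_eq_neg_one_iff]
        intro hinf
        exact h ((PySem.Chars.isIn_iff_infix _ _).mpr hinf)
      simp [hf]
    · have hr : PySem.Chars.rfind s ['>'] = -1 := by
        apply pv_rfind_eq_neg_one
        intro hinf
        exact h ((PySem.Chars.isIn_iff_infix _ _).mpr hinf)
      simp [hr]
  · rw [if_neg hin]
    by_cases hg : PySem.Chars.find s ['<'] = -1 ∨ PySem.Chars.rfind s ['>'] = -1 ∨
        PySem.Chars.find s ['<'] ≥ PySem.Chars.rfind s ['>']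
    · rw [if_pos hg, if_pos hg]
    · rw [if_neg hg, if_neg hg]
      set args_str := PySem.Chars.strip
        (PySem.List.slice s (some (PySem.Chars.find s ['<'] + 1))
          (some (PySem.Chars.rfind s ['>']))) with ha
      by_cases he : args_str = []
      · rw [if_pos he, if_pos he]
      · rw [if_neg he, if_neg he]
        congr 1
        have := pv_main args_str args_str 0 0 0 [] (by simp) (le_refl 0)
        simpa using this
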